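-- pv_equiv track=rewrite | github.com/Hyun-Ho95/CodingTest_Python-SQL | 프로그래머스/unrated/181932. 코드 처리하기/코드 처리하기.py | solution
-- ===== SOURCE A (Python) =====
-- def solution(code):
--     mode = 0
--     ret = ''
--
--     for idx,k in enumerate(code):
--         if mode ==0:
--             if k == "1":
--                 mode = 1
--             else:
--                 if idx % 2 ==0:
--                     ret += k
--         else:
--             if k =="1":
--                 mode = 0
--             else:
--                 if idx % 2 !=0:
--                     ret += k
--     return ret if ret != '' else 'EMPTY'
-- ===== SOURCE B (Python) =====
-- def solution(code):
--     # pass 1: modes[i] = parity of '1's in code[:i] (the state before index i)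
--     modes = []
--     m = 0
--     for c in code:
--         modes.append(m)
--         if c == '1':
--             m = 1 - m
--     # pass 2: keep c when it is not a toggle and its index parity matches the mode
--     kept = [c for (i, c), m in zip(enumerate(code), modes) if c != '1' and i % 2 == m]
--     return ''.join(kept) or 'EMPTY'
-- ===== Notes on version B (the rewrite author's own statement) =====
-- stated objective: alternative
-- what changed: Replaces the single stateful emit-as-you-go loop by two passes: one pass materialises a table of per-index mode parities, then a zip/comprehension filters the characters against that table.
import Mathlib
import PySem

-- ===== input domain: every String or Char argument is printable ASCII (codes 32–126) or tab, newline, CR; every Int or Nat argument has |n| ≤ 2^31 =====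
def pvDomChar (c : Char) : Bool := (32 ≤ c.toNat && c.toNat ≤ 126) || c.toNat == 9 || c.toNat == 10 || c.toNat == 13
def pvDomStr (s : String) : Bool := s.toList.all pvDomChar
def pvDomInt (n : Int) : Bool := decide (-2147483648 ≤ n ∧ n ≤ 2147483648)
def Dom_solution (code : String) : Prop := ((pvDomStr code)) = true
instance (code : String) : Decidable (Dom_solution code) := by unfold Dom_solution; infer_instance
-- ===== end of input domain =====

-- B replaces A's single stateful emit-as-you-go loop by two passes (a mode table, then a zip filter); same cost, different decomposition.

-- ===== PORT A =====
-- A-side helper: the body of A's for-loop (state = (mode, ret))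
def stepA (s : Int × List Char) (p : Int × Char) : Int × List Char :=
  if s.1 = 0 then
    if p.2 = '1' then (1, s.2)
    else if PySem.Int.mod p.1 2 = 0 then (s.1, s.2 ++ [p.2]) else (s.1, s.2)
  else
    if p.2 = '1' then (0, s.2)
    else if ¬ PySem.Int.mod p.1 2 = 0 then (s.1, s.2 ++ [p.2]) else (s.1, s.2)

-- literal transliteration of A: one fold over enumerate(code) carrying (mode, ret)
def solution (code : String) : String :=
  let st := (PySem.List.enumerate code.toList).foldl stepA (0, [])
  if st.2 ≠ [] then String.ofList st.2 else "EMPTY"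

-- ===== PORT B =====
-- pass 1 of Source B: fold building (modes, m); pass 2: filter over zip(enumerate(code), modes)
def solution_alt (code : String) : String :=
  let p := code.toList.foldl
    (fun (s : List Int × Int) c =>
      (s.1 ++ [s.2], if c = '1' then 1 - s.2 else s.2)) ([], 0)
  let kept := ((PySem.List.enumerate code.toList).zip p.1).filterMap
    (fun q => if q.1.2 ≠ '1' ∧ PySem.Int.mod q.1.1 2 = q.2 then some q.1.2 else none)
  if kept ≠ [] then String.ofList kept else "EMPTY"

-- ===== PRECONDITION & SPEC =====
def Spec_solution (code : String) (out : String) : Prop := out = solution_alt code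
instance (code : String) (out : String) : Decidable (Spec_solution code out) := by unfold Spec_solution; infer_instance

-- ===== CLAIM (what is proved, stated in full; the proofs are below) =====
def Claim_equal_solution : Prop := ∀ (code : String), Dom_solution code → Spec_solution code (solution code)

-- ===== LEMMAS AND PROOFS =====

-- the characters both programs keep, processing l from index i with current mode m
def keptF (i m : Int) : List Char → List Char
  | [] => []
  | c :: t =>
      if c = '1' then keptF (i + 1) (1 - m) t
      else (if PySem.Int.mod i 2 = m then [c] else []) ++ keptF (i + 1) m t

-- the mode table Source B builds, starting from mode m
def modesF (m : Int) : List Char → List Int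
  | [] => []
  | c :: t => m :: modesF (if c = '1' then 1 - m else m) t

lemma A_fold (l : List Char) : ∀ (i m : Int) (ret : List Char), (m = 0 ∨ m = 1) →
    ((PySem.List.enumerate l i).foldl stepA (m, ret)).2 = ret ++ keptF i m l := by
  induction l with
  | nil => intro i m ret _; simp [PySem.List.enumerate_nil, keptF]
  | cons c t ih =>
      intro i m ret hm
      rw [PySem.List.enumerate_cons, List.foldl_cons]
      have hb : (0:Int) < 2 := by norm_num
      have hrange := PySem.Int.mod_nonneg i hb
      have hlt := PySem.Int.mod_lt i hb
      rcases hm with hm | hm <;> subst hm <;> by_cases hc : c = '1'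
      · have hs : stepA (0, ret) (i, c) = (1, ret) := by simp [stepA, hc]
        rw [hs, ih (i+1) 1 ret (Or.inr rfl), keptF]
        simp [hc]
      · by_cases h2 : PySem.Int.mod i 2 = 0
        · have hd := (PySem.Int.mod_eq_zero_iff_dvd i 2).mp h2
          have hs : stepA (0, ret) (i, c) = (0, ret ++ [c]) := by simp [stepA, hc, hd]
          rw [hs, ih (i+1) 0 (ret ++ [c]) (Or.inl rfl), keptF]
          simp [hc, hd]
        · have hd : ¬ (2:Int) ∣ i := fun h => h2 ((PySem.Int.mod_eq_zero_iff_dvd i 2).mpr h)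
          have him : i % 2 = 1 := by omega
          have hs : stepA (0, ret) (i, c) = (0, ret) := by
            simp [stepA, hc, him]
          rw [hs, ih (i+1) 0 ret (Or.inl rfl), keptF]
          simp [hc, him]
      · have hs : stepA (1, ret) (i, c) = (0, ret) := by simp [stepA, hc]
        rw [hs, ih (i+1) 0 ret (Or.inl rfl), keptF]
        simp [hc]
      · by_cases h2 : PySem.Int.mod i 2 = 0
        · have h1 : ¬ PySem.Int.mod i 2 = 1 := by omega
          have hd := (PySem.Int.mod_eq_zero_iff_dvd i 2).mp h2
          have hs : stepA (1, ret) (i, c) = (1, ret) := by simp [stepA, hc, hd]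
          rw [hs, ih (i+1) 1 ret (Or.inr rfl), keptF]
          simp [hc, hd]
        · have h1 : PySem.Int.mod i 2 = 1 := by omega
          have hd : ¬ (2:Int) ∣ i := fun h => h2 ((PySem.Int.mod_eq_zero_iff_dvd i 2).mpr h)
          have him : i % 2 = 1 := by omega
          have hs : stepA (1, ret) (i, c) = (1, ret ++ [c]) := by
            simp [stepA, hc, him]
          rw [hs, ih (i+1) 1 (ret ++ [c]) (Or.inr rfl), keptF]
          simp [hc, him]

lemma B_modes (l : List Char) : ∀ (acc : List Int) (m : Int),
    (l.foldl (fun (s : List Int × Int) c =>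
      (s.1 ++ [s.2], if c = '1' then 1 - s.2 else s.2)) (acc, m)).1 = acc ++ modesF m l := by
  induction l with
  | nil => intro acc m; simp [modesF]
  | cons c t ih =>
      intro acc m
      rw [List.foldl_cons, ih (acc ++ [m]) (if c = '1' then 1 - m else m)]
      simp [modesF]

lemma B_kept (l : List Char) : ∀ (i m : Int),
    ((PySem.List.enumerate l i).zip (modesF m l)).filterMap
      (fun q => if q.1.2 ≠ '1' ∧ PySem.Int.mod q.1.1 2 = q.2 then some q.1.2 else none)
    = keptF i m l := by
  induction l with
  | nil => intro i m; simp [PySem.List.enumerate_nil, modesF, keptF]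
  | cons c t ih =>
      intro i m
      rw [PySem.List.enumerate_cons]
      simp only [modesF, List.zip_cons_cons, List.filterMap_cons]
      by_cases hc : c = '1'
      · subst hc
        simp only [keptF, ite_true, ne_eq, not_true_eq_false, false_and, if_false]
        exact ih (i+1) (1-m)
      · simp only [keptF, hc, ite_false, ne_eq, not_false_iff, true_and]
        have ih' := ih (i+1) m
        simp only [PySem.Int.mod, ne_eq] at ih'
        by_cases h2 : i.fmod 2 = m <;> simp [PySem.Int.mod, h2, ih']

-- ===== VERDICT (by name: the statement is the Claim_ definition above) =====
theorem solution_spec : Claim_equal_solution := by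
  intro code _
  have hA := A_fold code.toList 0 0 [] (Or.inl rfl)
  have hB := B_modes code.toList [] 0
  have hK := B_kept code.toList 0 0
  simp only [Spec_solution, solution, solution_alt, hA, hB, List.nil_append, hK]
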